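-- pv_equiv track=rewrite | github.com/kai-rayward/clawjournal | clawjournal/scoring/depth.py | _file_type_from_path
-- ===== SOURCE A (Python) =====
-- _EXT_TO_TYPE: dict[str, str] = {
--     ".py": "python file",
--     ".js": "javascript file",
--     ".ts": "typescript file",
--     ".tsx": "typescript file",
--     ".jsx": "javascript file",
--     ".rs": "rust file",
--     ".go": "go file",
--     ".java": "java file",
--     ".rb": "ruby file",
--     ".c": "c file",
--     ".cpp": "c++ file",
--     ".h": "header file",
--     ".cs": "c# file",
--     ".swift": "swift file",
--     ".kt": "kotlin file",
--     ".sh": "shell script",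
--     ".bash": "shell script",
--     ".zsh": "shell script",
--     ".html": "html file",
--     ".css": "css file",
--     ".scss": "css file",
--     ".json": "config file",
--     ".yaml": "config file",
--     ".yml": "config file",
--     ".toml": "config file",
--     ".ini": "config file",
--     ".cfg": "config file",
--     ".env": "config file",
--     ".xml": "config file",
--     ".md": "docs file",
--     ".rst": "docs file",
--     ".txt": "text file",
--     ".sql": "sql file",
--     ".proto": "protobuf file",
--     ".graphql": "graphql file",
--     ".dockerfile": "dockerfile",
--     ".lock": "lockfile",
-- }
--
-- def _file_type_from_path(path: str) -> str:
--     """Map a file path to a human-readable type label."""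
--     lower = path.lower()
--     # Check for test files
--     basename = lower.rsplit("/", 1)[-1] if "/" in lower else lower
--     if basename.startswith("test_") or basename.endswith("_test.py") or "_test." in basename:
--         return "test file"
--     if "/test/" in lower or "/tests/" in lower or "/__tests__/" in lower:
--         return "test file"
--     # Check extension
--     for ext, ftype in _EXT_TO_TYPE.items():
--         if lower.endswith(ext):
--             return ftype
--     # Special names
--     if basename in ("dockerfile", "makefile", "cmakelists.txt"):
--         return "dockerfile" if "docker" in basename else "build file"
--     return "file"
-- ===== SOURCE B (Python) =====
-- _EXT_TO_TYPE: dict[str, str] = {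
--     ".py": "python file", ".js": "javascript file", ".ts": "typescript file",
--     ".tsx": "typescript file", ".jsx": "javascript file", ".rs": "rust file",
--     ".go": "go file", ".java": "java file", ".rb": "ruby file", ".c": "c file",
--     ".cpp": "c++ file", ".h": "header file", ".cs": "c# file",
--     ".swift": "swift file", ".kt": "kotlin file", ".sh": "shell script",
--     ".bash": "shell script", ".zsh": "shell script", ".html": "html file",
--     ".css": "css file", ".scss": "css file", ".json": "config file",
--     ".yaml": "config file", ".yml": "config file", ".toml": "config file",
--     ".ini": "config file", ".cfg": "config file", ".env": "config file",
--     ".xml": "config file", ".md": "docs file", ".rst": "docs file",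
--     ".txt": "text file", ".sql": "sql file", ".proto": "protobuf file",
--     ".graphql": "graphql file", ".dockerfile": "dockerfile", ".lock": "lockfile",
-- }
--
-- # names handled by A's final special-name block, as a direct lookup table
-- _SPECIAL_NAMES: dict[str, str] = {
--     "dockerfile": "dockerfile",
--     "makefile": "build file",
--     "cmakelists.txt": "build file",
-- }
--
--
-- def _test_rule(lower: str, base: str):
--     if (base.startswith("test_") or base.endswith("_test.py") or "_test." in base
--             or "/test/" in lower or "/tests/" in lower or "/__tests__/" in lower):
--         return "test file"
--     return None
--
--
-- def _ext_rule(lower: str, base: str):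
--     # keyed lookup of the last-dot suffix; exact replacement of the endswith scan
--     # because every table key is "." plus a dot-free tail
--     if "." in lower:
--         return _EXT_TO_TYPE.get("." + lower.rsplit(".", 1)[-1])
--     return None
--
--
-- def _special_rule(lower: str, base: str):
--     return _SPECIAL_NAMES.get(base)
--
--
-- def _file_type_from_path(path: str) -> str:
--     """Map a file path to a human-readable type label."""
--     lower = path.lower()
--     base = lower.rsplit("/", 1)[-1]
--     for rule in (_test_rule, _ext_rule, _special_rule):
--         label = rule(lower, base)
--         if label is not None:
--             return label
--     return "file"
-- ===== Notes on version B (the rewrite author's own statement) =====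
-- stated objective: idiomatic
-- what changed: B is a rule pipeline (test-name rule, keyed extension lookup of the last-dot suffix, special-name lookup table) returning the first non-None label, replacing A's inline guard chain, its 37-entry endswith scan and its conditional special-name block by direct dict lookups.
import Mathlib
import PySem

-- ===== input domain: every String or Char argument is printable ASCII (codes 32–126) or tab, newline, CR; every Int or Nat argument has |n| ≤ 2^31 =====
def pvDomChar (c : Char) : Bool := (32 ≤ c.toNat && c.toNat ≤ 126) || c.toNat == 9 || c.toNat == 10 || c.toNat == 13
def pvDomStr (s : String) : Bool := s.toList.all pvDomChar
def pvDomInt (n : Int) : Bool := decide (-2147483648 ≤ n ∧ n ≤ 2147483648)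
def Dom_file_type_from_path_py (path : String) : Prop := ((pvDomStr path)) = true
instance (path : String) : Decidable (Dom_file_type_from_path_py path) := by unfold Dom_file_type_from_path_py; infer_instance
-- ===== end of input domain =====

-- B is a rule pipeline (test rule, keyed last-dot-suffix lookup, special-name table) returning the
-- first non-None label, replacing A's inline guards, its 37-entry endswith scan and its conditional
-- special-name block (idiomatic; same behaviour).

-- the _EXT_TO_TYPE dict, in source order (module-level data shared by both versions)
def pvTable : List (String × String) :=
  [(".py", "python file"), (".js", "javascript file"), (".ts", "typescript file"),
   (".tsx", "typescript file"), (".jsx", "javascript file"), (".rs", "rust file"),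
   (".go", "go file"), (".java", "java file"), (".rb", "ruby file"), (".c", "c file"),
   (".cpp", "c++ file"), (".h", "header file"), (".cs", "c# file"),
   (".swift", "swift file"), (".kt", "kotlin file"), (".sh", "shell script"),
   (".bash", "shell script"), (".zsh", "shell script"), (".html", "html file"),
   (".css", "css file"), (".scss", "css file"), (".json", "config file"),
   (".yaml", "config file"), (".yml", "config file"), (".toml", "config file"),
   (".ini", "config file"), (".cfg", "config file"), (".env", "config file"),
   (".xml", "config file"), (".md", "docs file"), (".rst", "docs file"),
   (".txt", "text file"), (".sql", "sql file"), (".proto", "protobuf file"),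
   (".graphql", "graphql file"), (".dockerfile", "dockerfile"), (".lock", "lockfile")]

-- hand port of `s.rsplit(sep, 1)[-1]` for a one-char sep: the characters after the
-- last occurrence of sep (exact: rsplit with maxsplit=1 cuts at the last sep, and
-- [-1] is the piece after it; when sep is absent it is the whole string)
def pvAfterLast (sep : Char) (cs : List Char) : List Char :=
  (cs.reverse.takeWhile (fun c => !(c == sep))).reverse

-- ===== PORT A =====
-- `lower.rsplit("/", 1)[-1] if "/" in lower else lower`
def pvBasename (lower : String) : String :=
  if PySem.Str.isIn "/" lower then String.ofList (pvAfterLast '/' lower.toList) else lower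

-- the `for ext, ftype in _EXT_TO_TYPE.items(): if lower.endswith(ext): return ftype` loop
def pvScan (lower : String) : List (String × String) → Option String
  | [] => none
  | (ext, ftype) :: rest =>
      if PySem.Str.endswith lower ext then some ftype else pvScan lower rest

def file_type_from_path_py (path : String) : String :=
  let lower := PySem.Str.lower path
  let basename := pvBasename lower
  if PySem.Str.startswith basename "test_" || PySem.Str.endswith basename "_test.py"
      || PySem.Str.isIn "_test." basename then
    "test file"
  else if PySem.Str.isIn "/test/" lower || PySem.Str.isIn "/tests/" lower
      || PySem.Str.isIn "/__tests__/" lower then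
    "test file"
  else
    match pvScan lower pvTable with
    | some ftype => ftype
    | none =>
        if basename == "dockerfile" || basename == "makefile" || basename == "cmakelists.txt" then
          if PySem.Str.isIn "docker" basename then "dockerfile" else "build file"
        else "file"

-- ===== PORT B =====
-- `_SPECIAL_NAMES` of Source B
def pvSpecialNames : List (String × String) :=
  [("dockerfile", "dockerfile"), ("makefile", "build file"), ("cmakelists.txt", "build file")]

-- `_test_rule`
def pvTestRule (lower base : String) : Option String :=
  if PySem.Str.startswith base "test_" || PySem.Str.endswith base "_test.py"
      || PySem.Str.isIn "_test." base || PySem.Str.isIn "/test/" lower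
      || PySem.Str.isIn "/tests/" lower || PySem.Str.isIn "/__tests__/" lower then
    some "test file"
  else none

-- `_ext_rule`
def pvExtRule (lower _base : String) : Option String :=
  if PySem.Str.isIn "." lower then
    (PySem.Dict.mk pvTable).get? (String.ofList ('.' :: pvAfterLast '.' lower.toList))
  else none

-- `_special_rule`
def pvSpecialRule (_lower base : String) : Option String :=
  (PySem.Dict.mk pvSpecialNames).get? base

-- `for rule in (...): label = rule(lower, base); if label is not None: return label`
def pvFirstSome (lower base : String) : List (String → String → Option String) → Option String
  | [] => none
  | r :: rs =>
      match r lower base with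
      | some label => some label
      | none => pvFirstSome lower base rs

def file_type_from_path_py_alt (path : String) : String :=
  let lower := PySem.Str.lower path
  let base := String.ofList (pvAfterLast '/' lower.toList)
  match pvFirstSome lower base [pvTestRule, pvExtRule, pvSpecialRule] with
  | some label => label
  | none => "file"

-- ===== PRECONDITION & SPEC =====
def Spec_file_type_from_path_py (path : String) (out : String) : Prop := out = file_type_from_path_py_alt path
instance (path : String) (out : String) : Decidable (Spec_file_type_from_path_py path out) := by unfold Spec_file_type_from_path_py; infer_instance

-- ===== CLAIM =====
def Claim_equal_file_type_from_path_py : Prop := ∀ (path : String), Dom_file_type_from_path_py path → Spec_file_type_from_path_py path (file_type_from_path_py path)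

-- ===== LEMMAS AND PROOFS =====

-- A's conditional basename equals B's unconditional one: when "/" is absent,
-- taking everything after the last '/' is the whole string
theorem pv_basename_eq (lower : String) :
    pvBasename lower = String.ofList (pvAfterLast '/' lower.toList) := by
  unfold pvBasename
  by_cases h : PySem.Str.isIn "/" lower = true
  · rw [if_pos h]
  · have hmem : '/' ∉ lower.toList := by
      rw [PySem.Str.isIn_eq, PySem.Chars.isIn_iff_infix] at h
      simpa using fun hm => h ((List.singleton_infix_iff '/' lower.toList).mpr hm)
    have : pvAfterLast '/' lower.toList = lower.toList := by
      unfold pvAfterLast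
      rw [List.takeWhile_eq_self_iff.mpr]
      · simp
      · intro c hc
        simp only [Bool.not_eq_true', beq_eq_false_iff_ne, ne_eq]
        intro hcs; exact hmem (hcs ▸ List.mem_reverse.mp hc)
    rw [if_neg h, this]
    simp

-- every key of _EXT_TO_TYPE is '.' followed by a nonempty dot-free tail
def pvGoodKey (k : String) : Bool :=
  match k.toList with
  | '.' :: r => !r.isEmpty && !r.contains '.'
  | _ => false

-- for such a key, ending with the key is exactly: the string has a dot and its
-- last-dot suffix is the key
theorem pv_suffix_iff (cs r : List Char) (_hr : r ≠ []) (hd : '.' ∉ r) :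
    ('.' :: r) <:+ cs ↔
      ('.' ∈ cs ∧ (cs.reverse.takeWhile (fun c => !(c == '.'))).reverse = r) := by
  constructor
  · rintro ⟨pre, rfl⟩
    have hrev : (pre ++ '.' :: r).reverse = r.reverse ++ '.' :: pre.reverse := by simp
    have htw : (pre ++ '.' :: r).reverse.takeWhile (fun c => !(c == '.')) = r.reverse := by
      rw [hrev, List.takeWhile_append_of_pos (by
        intro a ha
        simp only [Bool.not_eq_true', beq_eq_false_iff_ne, ne_eq]
        intro h; exact hd (h ▸ (List.mem_reverse.mp ha)))]
      simp
    refine ⟨by simp, by rw [htw]; simp⟩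
  · rintro ⟨hmem, htw⟩
    have hne : cs.reverse.dropWhile (fun c => !(c == '.')) ≠ [] := by
      simp only [ne_eq, List.dropWhile_eq_nil_iff]
      intro hall
      have := hall '.' (List.mem_reverse.mpr hmem)
      simp at this
    have hh := List.head_dropWhile_not (fun c => !(c == '.')) hne
    simp only [Bool.not_eq_false', beq_iff_eq] at hh
    have hdrop : cs.reverse.dropWhile (fun c => !(c == '.')) =
        '.' :: (cs.reverse.dropWhile (fun c => !(c == '.'))).tail := by
      conv_lhs => rw [← List.cons_head_tail hne]
      rw [hh]
    have hcs : cs = ((cs.reverse.dropWhile (fun c => !(c == '.'))).tail).reverse ++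
        '.' :: (cs.reverse.takeWhile (fun c => !(c == '.'))).reverse := by
      conv_lhs => rw [← List.reverse_reverse cs,
        ← List.takeWhile_append_dropWhile (p := fun c => !(c == '.')) (l := cs.reverse), hdrop]
      simp
    exact ⟨((cs.reverse.dropWhile (fun c => !(c == '.'))).tail).reverse, by rw [htw] at hcs; exact hcs.symm⟩

theorem pv_endswith_iff (lower k : String) (hk : pvGoodKey k = true) :
    PySem.Str.endswith lower k = true ↔
      (PySem.Str.isIn "." lower = true ∧
        String.ofList ('.' :: pvAfterLast '.' lower.toList) = k) := by
  unfold pvGoodKey at hk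
  split at hk
  case _ r heq =>
    simp only [Bool.and_eq_true, Bool.not_eq_true', List.isEmpty_eq_false_iff,
      List.contains_eq_mem, decide_eq_false_iff_not] at hk
    obtain ⟨hr, hd⟩ := hk
    have h1 : PySem.Str.endswith lower k = true ↔ ('.' :: r) <:+ lower.toList := by
      rw [PySem.Str.endswith_eq, PySem.Chars.endswith_iff, heq]
    have h2 : PySem.Str.isIn "." lower = true ↔ '.' ∈ lower.toList := by
      rw [PySem.Str.isIn_eq, PySem.Chars.isIn_iff_infix]
      simpa using List.singleton_infix_iff '.' lower.toList
    have h3 : (String.ofList ('.' :: pvAfterLast '.' lower.toList) = k) ↔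
        pvAfterLast '.' lower.toList = r := by
      constructor
      · intro h
        have : ('.' :: pvAfterLast '.' lower.toList) = k.toList := by rw [← h]; simp
        rw [heq] at this
        exact (List.cons.injEq _ _ _ _ ▸ this).2
      · intro h
        have : ('.' :: pvAfterLast '.' lower.toList) = k.toList := by rw [heq, h]
        rw [this]; simp
    rw [h1, h2, h3, pv_suffix_iff lower.toList r hr hd]
    unfold pvAfterLast
    tauto
  case _ => simp_all

-- A's endswith scan over the table computes exactly B's keyed lookup of the last-dot suffix
theorem pv_scan_eq (lower : String) (t : List (String × String))
    (hg : ∀ p ∈ t, pvGoodKey p.1 = true) :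
    pvScan lower t =
      (if PySem.Str.isIn "." lower then
        (PySem.Dict.mk t).get? (String.ofList ('.' :: pvAfterLast '.' lower.toList))
      else none) := by
  induction t with
  | nil =>
      simp [pvScan, PySem.Dict.get?]
  | cons p rest ih =>
      obtain ⟨k, v⟩ := p
      have hk := hg (k, v) (by simp)
      have hiff := pv_endswith_iff lower k hk
      by_cases he : PySem.Str.endswith lower k = true
      · obtain ⟨hin, hext⟩ := hiff.mp he
        have hkl : k.toList = '.' :: pvAfterLast '.' lower.toList := by rw [← hext]; simp
        have h1 : PySem.Chars.endswith lower.toList ('.' :: pvAfterLast '.' lower.toList) = true := by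
          rw [← hkl, ← PySem.Str.endswith_eq]; exact he
        have h2 : PySem.Chars.isIn ['.'] lower.toList = true := by
          have h := hin
          rw [PySem.Str.isIn_eq] at h
          simpa using h
        simp [pvScan, PySem.Dict.get?_mk_cons, hext.symm, h1, h2]
      · have ihr := ih (fun q hq => hg q (by simp [hq]))
        simp only [pvScan, Bool.not_eq_true] at he ⊢
        rw [he]
        simp only [Bool.false_eq_true, if_false, ihr]
        by_cases hin : PySem.Str.isIn "." lower = true
        · have hne : (k == String.ofList ('.' :: pvAfterLast '.' lower.toList)) = false := by
            simp only [beq_eq_false_iff_ne, ne_eq]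
            intro h
            have : PySem.Str.endswith lower k = true := hiff.mpr ⟨hin, h.symm⟩
            rw [he] at this; exact Bool.false_ne_true this
          simp [PySem.Dict.get?_mk_cons, hne]
        · simp only [Bool.not_eq_true] at hin
          rw [hin]
          simp

-- A's special-name conditional computes exactly B's special-name lookup
theorem pv_special_eq (lw base : String) :
    (if base == "dockerfile" || base == "makefile" || base == "cmakelists.txt" then
      if PySem.Str.isIn "docker" base then "dockerfile" else "build file"
    else "file") =
    (match pvSpecialRule lw base with
     | some label => label
     | none => "file") := by
  unfold pvSpecialRule pvSpecialNames
  by_cases h1 : base = "dockerfile"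
  · subst h1; decide
  · by_cases h2 : base = "makefile"
    · subst h2; decide
    · by_cases h3 : base = "cmakelists.txt"
      · subst h3; decide
      · have e1 : (base == "dockerfile") = false := by simpa using h1
        have e2 : (base == "makefile") = false := by simpa using h2
        have e3 : (base == "cmakelists.txt") = false := by simpa using h3
        have f1 : ("dockerfile" == base) = false := by
          simpa using fun h => h1 h.symm
        have f2 : ("makefile" == base) = false := by
          simpa using fun h => h2 h.symm
        have f3 : ("cmakelists.txt" == base) = false := by
          simpa using fun h => h3 h.symm
        simp [e1, e2, e3, f1, f2, f3, PySem.Dict.get?]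

-- the table's keys all have the good shape
theorem pv_table_good : ∀ p ∈ pvTable, pvGoodKey p.1 = true := by decide

-- A's endswith scan over the table computes exactly B's extension rule
theorem pv_scan_eq_ext (lower base : String) :
    pvScan lower pvTable = pvExtRule lower base :=
  pv_scan_eq lower pvTable pv_table_good

-- stepping lemmas for B's rule pipeline
theorem pvFirstSome_cons_some (lower base l : String)
    (r : String → String → Option String) (rs : List (String → String → Option String))
    (h : r lower base = some l) :
    pvFirstSome lower base (r :: rs) = some l := by
  simp [pvFirstSome, h]

theorem pvFirstSome_cons_none (lower base : String)
    (r : String → String → Option String) (rs : List (String → String → Option String))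
    (h : r lower base = none) :
    pvFirstSome lower base (r :: rs) = pvFirstSome lower base rs := by
  simp [pvFirstSome, h]

-- the zeta-reduced bodies of the two ports agree, for any lowered string
theorem pv_main (lower : String) :
    (if PySem.Str.startswith (pvBasename lower) "test_"
        || PySem.Str.endswith (pvBasename lower) "_test.py"
        || PySem.Str.isIn "_test." (pvBasename lower) then
      "test file"
    else if PySem.Str.isIn "/test/" lower || PySem.Str.isIn "/tests/" lower
        || PySem.Str.isIn "/__tests__/" lower then
      "test file"
    else
      match pvScan lower pvTable with
      | some ftype => ftype
      | none =>
          if pvBasename lower == "dockerfile" || pvBasename lower == "makefile"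
              || pvBasename lower == "cmakelists.txt" then
            if PySem.Str.isIn "docker" (pvBasename lower) then "dockerfile" else "build file"
          else "file") =
    (match pvFirstSome lower (String.ofList (pvAfterLast '/' lower.toList))
        [pvTestRule, pvExtRule, pvSpecialRule] with
     | some label => label
     | none => "file") := by
  rw [← pv_basename_eq lower]
  by_cases h1 : (PySem.Str.startswith (pvBasename lower) "test_"
      || PySem.Str.endswith (pvBasename lower) "_test.py"
      || PySem.Str.isIn "_test." (pvBasename lower)) = true
  · rw [if_pos h1,
      pvFirstSome_cons_some lower (pvBasename lower) "test file" pvTestRule _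
        (by unfold pvTestRule; rw [h1]; rfl)]
  · simp only [Bool.not_eq_true] at h1
    by_cases h2 : (PySem.Str.isIn "/test/" lower || PySem.Str.isIn "/tests/" lower
        || PySem.Str.isIn "/__tests__/" lower) = true
    · rw [if_neg (by rw [h1]; exact Bool.false_ne_true), if_pos h2,
        pvFirstSome_cons_some lower (pvBasename lower) "test file" pvTestRule _
          (by unfold pvTestRule; rw [h1]; simp only [Bool.false_or]; rw [h2]; rfl)]
    · simp only [Bool.not_eq_true] at h2
      rw [if_neg (by rw [h1]; exact Bool.false_ne_true),
        if_neg (by rw [h2]; exact Bool.false_ne_true),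
        pvFirstSome_cons_none lower (pvBasename lower) pvTestRule _
          (by unfold pvTestRule; rw [h1]; simp only [Bool.false_or]; rw [h2]; rfl),
        pv_scan_eq_ext lower (pvBasename lower)]
      cases he : pvExtRule lower (pvBasename lower) with
      | some f =>
          rw [pvFirstSome_cons_some lower (pvBasename lower) f pvExtRule _ he]
      | none =>
          rw [pvFirstSome_cons_none lower (pvBasename lower) pvExtRule _ he]
          have hspec := pv_special_eq lower (pvBasename lower)
          cases hs : pvSpecialRule lower (pvBasename lower) with
          | some l =>
              rw [pvFirstSome_cons_some lower (pvBasename lower) l pvSpecialRule _ hs]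
              rw [hs] at hspec
              exact hspec
          | none =>
              rw [pvFirstSome_cons_none lower (pvBasename lower) pvSpecialRule _ hs]
              rw [hs] at hspec
              exact hspec

-- ===== VERDICT =====
theorem file_type_from_path_py_spec : Claim_equal_file_type_from_path_py := by
  intro path _
  show file_type_from_path_py path = file_type_from_path_py_alt path
  unfold file_type_from_path_py file_type_from_path_py_alt
  simp only []
  exact pv_main (PySem.Str.lower path)
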